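-- pv_equiv track=rewrite | github.com/hhce2303/proyecto_app | models/admin_model.py | _guess_pk
-- ===== SOURCE A (Python) =====
-- def _guess_pk(col_names):
--     """Adivina cuál es la columna PK"""
--     candidates = [c for c in col_names if c.lower() in ("id", "id_") or
--                  c.lower().endswith("_id") or c.lower().startswith("id_")]
--     if candidates:
--         return candidates[0]
--     for c in col_names:
--         if 'id' in c.lower():
--             return c
--     return col_names[0] if col_names else None
-- ===== SOURCE B (Python) =====
-- def _pk_tier(c):
--     lc = c.lower()
--     if lc in ("id", "id_") or lc.endswith("_id") or lc.startswith("id_"):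
--         return 0
--     if 'id' in lc:
--         return 1
--     return 2
--
-- def _guess_pk(col_names):
--     """Adivina cuál es la columna PK"""
--     if not col_names:
--         return None
--     return min(col_names, key=_pk_tier)
-- ===== Notes on version B (the rewrite author's own statement) =====
-- stated objective: idiomatic
-- what changed: Replaces A's staged scans (filter for strong candidates, early-return weak loop, positional fallback) by a ranking scheme: each column gets a tier (0 strong, 1 weak, 2 other) and the answer is min(col_names, key=tier), whose first-minimum tie-breaking yields exactly A's priority order.
import Mathlib
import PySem

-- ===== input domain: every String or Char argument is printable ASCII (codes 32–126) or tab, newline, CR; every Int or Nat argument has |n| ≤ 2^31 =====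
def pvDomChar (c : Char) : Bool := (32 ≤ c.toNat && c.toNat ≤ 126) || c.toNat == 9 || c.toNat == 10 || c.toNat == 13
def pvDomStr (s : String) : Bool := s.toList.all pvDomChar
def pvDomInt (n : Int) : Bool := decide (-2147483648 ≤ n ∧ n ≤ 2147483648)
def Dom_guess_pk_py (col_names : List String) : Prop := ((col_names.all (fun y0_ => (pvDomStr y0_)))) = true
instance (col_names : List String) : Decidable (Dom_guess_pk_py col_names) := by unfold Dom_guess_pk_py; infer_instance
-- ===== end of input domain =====

-- B replaces A's staged scans (strong filter, weak early-return loop, positional fallback) by a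
-- tier ranking (0 strong / 1 weak / 2 other) and min(col_names, key=tier); objective: idiomatic, same O(n).

-- ===== PORT A =====
-- strong candidate test, exactly A's comprehension condition
def pvStrongA (c : String) : Bool :=
  (PySem.Str.lower c == "id" || PySem.Str.lower c == "id_") ||
  PySem.Str.endswith (PySem.Str.lower c) "_id" ||
  PySem.Str.startswith (PySem.Str.lower c) "id_"

-- weak test, A's `'id' in c.lower()`
def pvWeakA (c : String) : Bool := PySem.Str.isIn "id" (PySem.Str.lower c)

def guess_pk_py (col_names : List String) : Option String :=
  let candidates := col_names.filter pvStrongA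
  match candidates with
  | c :: _ => some c
  | [] =>
    -- the for-loop with early return = first element satisfying the weak test
    match col_names.find? pvWeakA with
    | some c => some c
    | none =>
      match col_names with
      | [] => none
      | c :: _ => some c

-- ===== PORT B =====
-- Source B's _pk_tier: 0 = strong PK name, 1 = contains 'id', 2 = anything else
def pvTier (c : String) : Int :=
  let lc := PySem.Str.lower c
  if (lc == "id" || lc == "id_") || PySem.Str.endswith lc "_id" || PySem.Str.startswith lc "id_" then 0
  else if PySem.Str.isIn "id" lc then 1
  else 2

def guess_pk_py_alt (col_names : List String) : Option String :=
  match col_names with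
  | [] => none
  | _ => PySem.List.min? col_names pvTier

-- ===== PRECONDITION & SPEC =====
def Spec_guess_pk_py (col_names : List String) (out : Option String) : Prop := out = guess_pk_py_alt col_names
instance (col_names : List String) (out : Option String) : Decidable (Spec_guess_pk_py col_names out) := by unfold Spec_guess_pk_py; infer_instance

-- ===== CLAIM (what is proved, stated in full; the proofs are below) =====
def Claim_equal_guess_pk_py : Prop := ∀ (col_names : List String), Dom_guess_pk_py col_names → Spec_guess_pk_py col_names (guess_pk_py col_names)

-- ===== LEMMAS AND PROOFS =====

-- the tier is 0 on strong names, 1 on weak ones, 2 otherwise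
theorem pvTier_eq (c : String) :
    pvTier c = if pvStrongA c then 0 else if pvWeakA c then 1 else 2 := rfl

-- one fold step of min?: absorb the second element into the accumulator position
theorem pvMin_cons (m c : String) (t : List String) :
    PySem.List.min? (m :: c :: t) pvTier =
    PySem.List.min? ((if pvTier c < pvTier m then c else m) :: t) pvTier := by
  by_cases h : pvTier c < pvTier m <;>
    simp [PySem.List.min?, List.foldl_cons, h]

-- min-by-tier of a nonempty list, characterized by A's staged priorities
theorem pvMin_key (m : String) (l : List String) :
    PySem.List.min? (m :: l) pvTier =
    (if pvStrongA m then some m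
     else match (l.filter pvStrongA).head? with
       | some s => some s
       | none =>
         if pvWeakA m then some m
         else match l.find? pvWeakA with
           | some w => some w
           | none => some m) := by
  induction l generalizing m with
  | nil =>
    by_cases hs : pvStrongA m <;> by_cases hw : pvWeakA m <;>
      simp [PySem.List.min?, hs, hw]
  | cons c t ih =>
    rw [pvMin_cons]
    simp only [List.filter_cons, List.find?_cons]
    by_cases hsm : pvStrongA m = true
    · have hnc : ¬ pvTier c < pvTier m := by
        rw [pvTier_eq, pvTier_eq]; split_ifs <;> omega
      rw [if_neg hnc, ih m]
      simp [hsm]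
    · by_cases hsc : pvStrongA c = true
      · have hlt : pvTier c < pvTier m := by
          rw [pvTier_eq, pvTier_eq]; split_ifs <;> omega
        rw [if_pos hlt, ih c]
        simp [hsm, hsc]
      · by_cases hwm : pvWeakA m = true
        · have hnc : ¬ pvTier c < pvTier m := by
            rw [pvTier_eq, pvTier_eq]; split_ifs <;> omega
          rw [if_neg hnc, ih m]
          simp [hsm, hsc, hwm]
        · by_cases hwc : pvWeakA c = true
          · have hlt : pvTier c < pvTier m := by
              rw [pvTier_eq, pvTier_eq]
              split_ifs <;> omega
            rw [if_pos hlt, ih c]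
            simp [hsm, hsc, hwm, hwc]
          · have hnc : ¬ pvTier c < pvTier m := by
              rw [pvTier_eq, pvTier_eq]; split_ifs <;> omega
            rw [if_neg hnc, ih m]
            simp [hsm, hsc, hwm, hwc]

-- ===== VERDICT (by name: the statement is the Claim_ definition above) =====
theorem guess_pk_py_spec : Claim_equal_guess_pk_py := by
  intro col_names _
  unfold Spec_guess_pk_py guess_pk_py guess_pk_py_alt
  cases col_names with
  | nil => simp
  | cons c t =>
    rw [pvMin_key]
    simp only [List.filter_cons, List.find?_cons]
    by_cases hsc : pvStrongA c = true
    · simp [hsc]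
    · rcases hl : List.filter pvStrongA t with _ | ⟨s, ts⟩
      · have hf2 : (List.filter pvStrongA t).head? = none := by rw [hl]; rfl
        by_cases hwc : pvWeakA c = true
        · simp [hsc, hwc]
        · simp only [hsc, hwc, Bool.false_eq_true, if_false]
          cases List.find? pvWeakA t <;> simp
      · have hf2 : (List.filter pvStrongA t).head? = some s := by rw [hl]; rfl
        simp [hsc]
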